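-- pv_equiv track=rewrite | github.com/qwibitai/nanoclaw | scripts/workflow/render-launchd-schedule.py | extract_calendar_watching
-- ===== SOURCE A (Python) =====
-- def extract_block(text: str, block_name: str) -> list[str]:
--     lines = text.splitlines()
--     capture = False
--     depth = 0
--     collected: list[str] = []
--     header = f"{block_name} = {{"
--     for line in lines:
--         stripped = line.strip()
--         if not capture and stripped == header:
--             capture = True
--             depth = 1
--             continue
--         if not capture:
--             continue
--         depth += line.count("{")
--         depth -= line.count("}")
--         if depth <= 0:
--             break
--         collected.append(line.rstrip())
--     return collected
--
-- def extract_calendar_watching(text: str) -> bool: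
--     channels = extract_block(text, "event channels")
--     in_calendar = False
--     for raw_line in channels:
--         line = raw_line.strip()
--         if line.startswith('"com.apple.launchd.calendarinterval" = {'):
--             in_calendar = True
--             continue
--         if in_calendar and line == "}":
--             in_calendar = False
--             continue
--         if in_calendar and line == "watching = 1":
--             return True
--     return False
-- ===== SOURCE B (Python) =====
-- def extract_calendar_watching(text: str) -> bool:
--     capturing = False
--     depth = 0
--     in_calendar = False
--     for line in text.splitlines():
--         stripped = line.strip()
--         if not capturing:
--             if stripped == "event channels = {":
--                 capturing = True
--                 depth = 1
--             continue
--         depth += line.count("{") - line.count("}")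
--         if depth <= 0:
--             return False
--         if stripped.startswith('"com.apple.launchd.calendarinterval" = {'):
--             in_calendar = True
--         elif in_calendar and stripped == "}":
--             in_calendar = False
--         elif in_calendar and stripped == "watching = 1":
--             return True
--     return False
-- ===== Notes on version B (the rewrite author's own statement) =====
-- stated objective: simpler
-- what changed: A builds the target block as an intermediate list via a helper pass and then scans that list for the calendar sub-block in a second pass; B is a single pass over the lines with one state machine (capturing flag, brace depth, in_calendar flag) and no helper or intermediate list.
import Mathlib
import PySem

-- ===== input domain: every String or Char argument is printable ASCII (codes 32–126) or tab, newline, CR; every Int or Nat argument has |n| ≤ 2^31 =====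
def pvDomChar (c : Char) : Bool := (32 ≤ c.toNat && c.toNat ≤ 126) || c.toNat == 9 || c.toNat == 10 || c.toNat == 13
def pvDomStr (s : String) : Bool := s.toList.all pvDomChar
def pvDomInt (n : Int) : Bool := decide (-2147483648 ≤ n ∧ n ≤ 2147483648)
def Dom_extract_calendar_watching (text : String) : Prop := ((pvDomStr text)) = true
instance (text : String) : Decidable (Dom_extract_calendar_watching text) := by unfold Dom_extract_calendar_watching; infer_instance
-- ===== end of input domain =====

-- B fuses A's two passes (collect the "event channels" block into a list, then scan it)
-- into one state machine over the lines, with no intermediate list (objective: simpler).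

-- ===== PORT A =====
-- the loop of extract_block: state (capture, depth, collected)
def pvBlockLoop (header : String) : List String → Bool → Int → List String → List String
  | [], _, _, collected => collected
  | line :: rest, capture, depth, collected =>
    let stripped := PySem.Str.strip line
    if !capture && stripped == header then
      pvBlockLoop header rest true 1 collected
    else if !capture then
      pvBlockLoop header rest capture depth collected
    else
      let depth' := depth + (PySem.Str.count line "{" : Int) - (PySem.Str.count line "}" : Int)
      if depth' ≤ 0 then collected
      else pvBlockLoop header rest capture depth' (collected ++ [PySem.Str.rstrip line])

def extract_block (text : String) (block_name : String) : List String :=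
  pvBlockLoop (block_name ++ " = {") (PySem.Str.splitlines text) false 0 []

-- the loop of extract_calendar_watching, over the collected block
def pvCalScan : List String → Bool → Bool
  | [], _ => false
  | raw_line :: rest, in_calendar =>
    let line := PySem.Str.strip raw_line
    if PySem.Str.startswith line "\"com.apple.launchd.calendarinterval\" = {" then
      pvCalScan rest true
    else if in_calendar && line == "}" then
      pvCalScan rest false
    else if in_calendar && line == "watching = 1" then
      true
    else
      pvCalScan rest in_calendar

def extract_calendar_watching (text : String) : Bool :=
  pvCalScan (extract_block text "event channels") false

-- ===== PORT B =====
-- one pass, state (capturing, depth, in_calendar)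
def pvFused : List String → Bool → Int → Bool → Bool
  | [], _, _, _ => false
  | line :: rest, capturing, depth, in_calendar =>
    let stripped := PySem.Str.strip line
    if !capturing then
      if stripped == "event channels = {" then pvFused rest true 1 in_calendar
      else pvFused rest capturing depth in_calendar
    else
      let depth' := depth + ((PySem.Str.count line "{" : Int) - (PySem.Str.count line "}" : Int))
      if depth' ≤ 0 then false
      else if PySem.Str.startswith stripped "\"com.apple.launchd.calendarinterval\" = {" then
        pvFused rest capturing depth' true
      else if in_calendar && stripped == "}" then
        pvFused rest capturing depth' false
      else if in_calendar && stripped == "watching = 1" then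
        true
      else
        pvFused rest capturing depth' in_calendar

def extract_calendar_watching_alt (text : String) : Bool :=
  pvFused (PySem.Str.splitlines text) false 0 false

-- ===== PRECONDITION & SPEC =====
def Spec_extract_calendar_watching (text : String) (out : Bool) : Prop := out = extract_calendar_watching_alt text
instance (text : String) (out : Bool) : Decidable (Spec_extract_calendar_watching text out) := by unfold Spec_extract_calendar_watching; infer_instance

-- ===== CLAIM (what is proved, stated in full; the proofs are below) =====
def Claim_equal_extract_calendar_watching : Prop := ∀ (text : String), Dom_extract_calendar_watching text → Spec_extract_calendar_watching text (extract_calendar_watching text)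

-- ===== LEMMAS AND PROOFS =====

-- A stores rstrip-ped lines and re-strips them in its second pass; B strips the raw line.
-- These agree because strip ∘ rstrip = strip, proved on the List Char side below.
theorem pv_rstrip_nil : PySem.Chars.rstrip [] = [] := rfl

theorem pv_lstrip_nil : PySem.Chars.lstrip [] = [] := rfl

theorem pv_lstrip_cons (c : Char) (s : List Char) :
    PySem.Chars.lstrip (c :: s) =
      if PySem.Chars.isspace c then PySem.Chars.lstrip s else c :: s := by
  simp [PySem.Chars.lstrip, List.dropWhile_cons]

theorem pv_rstrip_cons (c : Char) (s : List Char) :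
    PySem.Chars.rstrip (c :: s) =
      if PySem.Chars.rstrip s = [] then (if PySem.Chars.isspace c then ([] : List Char) else [c])
      else c :: PySem.Chars.rstrip s := by
  simp only [PySem.Chars.rstrip, List.reverse_cons, List.dropWhile_append]
  by_cases h : List.dropWhile PySem.Chars.isspace s.reverse = []
  · simp [h, List.dropWhile]
    by_cases hc : PySem.Chars.isspace c <;> simp [hc]
  · simp [h, List.isEmpty_iff, List.reverse_eq_nil_iff]

theorem pv_rstrip_eq_nil_iff (s : List Char) :
    PySem.Chars.rstrip s = [] ↔ ∀ x ∈ s, PySem.Chars.isspace x := by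
  simp [PySem.Chars.rstrip, List.reverse_eq_nil_iff, List.dropWhile_eq_nil_iff]

theorem pv_lstrip_rstrip (s : List Char) :
    PySem.Chars.lstrip (PySem.Chars.rstrip s) = PySem.Chars.rstrip (PySem.Chars.lstrip s) := by
  induction s with
  | nil => rfl
  | cons c s ih =>
    by_cases h : PySem.Chars.rstrip s = []
    · have hl : PySem.Chars.lstrip s = [] :=
        List.dropWhile_eq_nil_iff.2 ((pv_rstrip_eq_nil_iff s).1 h)
      by_cases hc : PySem.Chars.isspace c <;>
        simp [pv_rstrip_cons, pv_lstrip_cons, pv_rstrip_nil, pv_lstrip_nil, h, hc, hl]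
    · by_cases hc : PySem.Chars.isspace c <;>
        simp [pv_rstrip_cons, pv_lstrip_cons, h, hc, ih]

theorem pv_rstrip_idem (s : List Char) :
    PySem.Chars.rstrip (PySem.Chars.rstrip s) = PySem.Chars.rstrip s := by
  simp [PySem.Chars.rstrip, List.dropWhile_idempotent]

theorem pv_strip_rstrip (s : String) :
    PySem.Str.strip (PySem.Str.rstrip s) = PySem.Str.strip s := by
  simp only [PySem.Str.strip, PySem.Str.toList_rstrip]
  congr 1
  simp only [PySem.Chars.strip]
  rw [pv_lstrip_rstrip, pv_rstrip_idem]

-- accumulator lemma for A's collecting loop in the capturing state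
theorem pvBlockLoop_acc (h : String) (rest : List String) (d : Int) (c : List String) :
    pvBlockLoop h rest true d c = c ++ pvBlockLoop h rest true d [] := by
  induction rest generalizing d c with
  | nil => simp [pvBlockLoop]
  | cons line rest ih =>
    simp only [pvBlockLoop, Bool.not_true, Bool.false_and, Bool.false_eq_true, ite_false]
    split
    · simp
    · rw [ih _ (c ++ [PySem.Str.rstrip line]), ih _ ([] ++ [PySem.Str.rstrip line])]
      simp

-- core: in the capturing state, scanning A's collected block equals B's fused loop
theorem pv_cap (rest : List String) (d : Int) (ic : Bool) :
    pvCalScan (pvBlockLoop "event channels = {" rest true d []) ic = pvFused rest true d ic := by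
  induction rest generalizing d ic with
  | nil => rfl
  | cons line rest ih =>
    simp only [pvBlockLoop, pvFused, Bool.not_true, Bool.false_and, Bool.false_eq_true, ite_false]
    have harith : d + (PySem.Str.count line "{" : Int) - (PySem.Str.count line "}" : Int)
        = d + ((PySem.Str.count line "{" : Int) - (PySem.Str.count line "}" : Int)) := by ring
    rw [harith]
    split
    · rfl
    · rw [pvBlockLoop_acc, List.nil_append, List.singleton_append]
      simp only [pvCalScan, pv_strip_rstrip]
      split
      · exact ih _ _
      · split
        · exact ih _ _
        · split
          · rfl
          · exact ih _ _

-- before capture starts, both loops skip lines identically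
theorem pv_pre (lines : List String) :
    pvCalScan (pvBlockLoop "event channels = {" lines false 0 []) false = pvFused lines false 0 false := by
  induction lines with
  | nil => rfl
  | cons line rest ih =>
    simp only [pvBlockLoop, pvFused, Bool.not_false, Bool.true_and]
    split
    · exact pv_cap rest 1 false
    · simp only [ite_true]
      exact ih

-- ===== VERDICT (by name: the statement is the Claim_ definition above) =====
theorem extract_calendar_watching_spec : Claim_equal_extract_calendar_watching := by
  intro text _
  unfold Spec_extract_calendar_watching extract_calendar_watching extract_block extract_calendar_watching_alt
  have h : ("event channels" ++ " = {" : String) = "event channels = {" := rfl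
  rw [h, pv_pre]
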